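-- pv_equiv track=rewrite | github.com/aigambitkg/AI-Red-Team-Onion | payloads/tier3_resource_exhaustion.py | generate_regex_dos
-- ===== SOURCE A (Python) =====
-- from typing import Dict, List, Optional, Any, Callable
--
-- def generate_regex_dos(patterns: Optional[List[str]] = None) -> List[str]:
--     """
--     Generate ReDoS (Regular Expression Denial of Service) payloads.
--
--     Args:
--         patterns: Optional custom regex patterns to exploit
--
--     Returns:
--         List of ReDoS payloads
--     """
--     # Classic ReDoS patterns that cause catastrophic backtracking
--     default_patterns = [
--         # Exponential backtracking
--         "(a+)+$",
--         "(a*)*$",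
--         "(a|a)*$",
--         "(a|ab)*$",
--
--         # Nested quantifiers
--         "([a-zA-Z]+)*$",
--         "(x+x+)+y$",
--         "(a|a)*b$",
--         "(.*a){x}b$",
--
--         # Email validation redos
--         "^([a-zA-Z0-9]+([-._]?[a-zA-Z0-9]+)*)@([a-zA-Z0-9]+([-.]?[a-zA-Z0-9]+)*)(\\.[a-zA-Z]{2,})+$",
--
--         # URL validation redos
--         "^(https?|ftp)://[^/]+(/.*)?$",
--     ]
--
--     patterns_to_use = patterns if patterns else default_patterns
--
--     # Generate payload strings that trigger worst-case behavior
--     payloads = []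
--     test_strings = [
--         "a" * 30,
--         "x" * 35,
--         "aaaaaaaaaaaaaaaaaaaaaaaaaaaaaab",
--         "email@domain.com" * 5,
--     ]
--
--     for pattern in patterns_to_use:
--         for test_str in test_strings:
--             payloads.append({
--                 'pattern': pattern,
--                 'test_string': test_str,
--                 'expected_behavior': 'catastrophic_backtracking'
--             })
--
--     return [p['test_string'] for p in payloads]
-- ===== SOURCE B (Python) =====
-- from typing import Dict, List, Optional, Any, Callable
--
-- def generate_regex_dos(patterns: Optional[List[str]] = None) -> List[str]:
--     default_patterns = [
--         "(a+)+$",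
--         "(a*)*$",
--         "(a|a)*$",
--         "(a|ab)*$",
--         "([a-zA-Z]+)*$",
--         "(x+x+)+y$",
--         "(a|a)*b$",
--         "(.*a){x}b$",
--         "^([a-zA-Z0-9]+([-._]?[a-zA-Z0-9]+)*)@([a-zA-Z0-9]+([-.]?[a-zA-Z0-9]+)*)(\\.[a-zA-Z]{2,})+$",
--         "^(https?|ftp)://[^/]+(/.*)?$",
--     ]
--     test_strings = [
--         "a" * 30,
--         "x" * 35,
--         "aaaaaaaaaaaaaaaaaaaaaaaaaaaaaab",
--         "email@domain.com" * 5,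
--     ]
--     patterns_to_use = patterns if patterns else default_patterns
--     # Each pattern contributes exactly the four test strings, in order.
--     return test_strings * len(patterns_to_use)
-- ===== Notes on version B (the rewrite author's own statement) =====
-- stated objective: simpler
-- what changed: The returned list is just the four test strings repeated once per pattern, so B drops the nested loop building a dict per element and the final projection pass and returns test_strings * len(patterns_to_use).
import Mathlib
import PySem

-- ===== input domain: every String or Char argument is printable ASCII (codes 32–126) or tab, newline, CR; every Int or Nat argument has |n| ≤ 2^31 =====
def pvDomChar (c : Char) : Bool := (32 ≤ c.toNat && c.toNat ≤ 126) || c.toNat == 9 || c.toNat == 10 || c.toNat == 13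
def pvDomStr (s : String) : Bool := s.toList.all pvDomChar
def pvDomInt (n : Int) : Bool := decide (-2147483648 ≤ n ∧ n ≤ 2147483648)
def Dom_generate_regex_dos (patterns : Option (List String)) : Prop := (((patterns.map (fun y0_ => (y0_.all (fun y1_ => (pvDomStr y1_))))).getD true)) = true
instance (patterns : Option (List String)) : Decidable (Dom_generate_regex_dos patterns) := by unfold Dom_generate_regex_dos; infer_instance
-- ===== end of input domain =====

-- B returns the same list as A by observing it is test_strings repeated once per pattern (objective: simpler).

-- shared literal constants (verbatim from the Python sources; both programs carry the same literals)
def pvDefaultPatterns : List String :=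
  ["(a+)+$", "(a*)*$", "(a|a)*$", "(a|ab)*$",
   "([a-zA-Z]+)*$", "(x+x+)+y$", "(a|a)*b$", "(.*a){x}b$",
   "^([a-zA-Z0-9]+([-._]?[a-zA-Z0-9]+)*)@([a-zA-Z0-9]+([-.]?[a-zA-Z0-9]+)*)(\\.[a-zA-Z]{2,})+$",
   "^(https?|ftp)://[^/]+(/.*)?$"]

def pvTestStrings : List String :=
  ["aaaaaaaaaaaaaaaaaaaaaaaaaaaaaa",
   "xxxxxxxxxxxxxxxxxxxxxxxxxxxxxxxxxxx",
   "aaaaaaaaaaaaaaaaaaaaaaaaaaaaaab",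
   "email@domain.comemail@domain.comemail@domain.comemail@domain.comemail@domain.com"]

-- ===== PORT A =====
-- nested loop appending one dict per (pattern, test_str); then a projection pass.
-- p['test_string'] always succeeds in A, so `.getD ""` is exact here (the key is always present).
def generate_regex_dos (patterns : Option (List String)) : List String :=
  let patterns_to_use : List String :=
    match patterns with
    | some l => if l.isEmpty then pvDefaultPatterns else l
    | none => pvDefaultPatterns
  let payloads : List (PySem.Dict String String) :=
    patterns_to_use.foldl (fun acc pattern =>
      pvTestStrings.foldl (fun acc2 test_str =>
        acc2 ++ [((PySem.Dict.empty.insert "pattern" pattern).insert "test_string" test_str).insert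
                   "expected_behavior" "catastrophic_backtracking"]) acc) []
  payloads.map (fun p => (PySem.Dict.get? p "test_string").getD "")

-- ===== PORT B =====
def generate_regex_dos_alt (patterns : Option (List String)) : List String :=
  let patterns_to_use : List String :=
    match patterns with
    | some l => if l.isEmpty then pvDefaultPatterns else l
    | none => pvDefaultPatterns
  (List.replicate patterns_to_use.length pvTestStrings).flatten

-- ===== PRECONDITION & SPEC =====
def Spec_generate_regex_dos (patterns : Option (List String)) (out : List String) : Prop := out = generate_regex_dos_alt patterns
instance (patterns : Option (List String)) (out : List String) : Decidable (Spec_generate_regex_dos patterns out) := by unfold Spec_generate_regex_dos; infer_instance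

-- ===== CLAIM (what is proved, stated in full; the proofs are below) =====
def Claim_equal_generate_regex_dos : Prop := ∀ (patterns : Option (List String)), Dom_generate_regex_dos patterns → Spec_generate_regex_dos patterns (generate_regex_dos patterns)

-- ===== LEMMAS AND PROOFS =====

-- the dict built for one (pattern, test_str) iteration of A's inner loop
def pvMkDict (pattern test_str : String) : PySem.Dict String String :=
  ((PySem.Dict.empty.insert "pattern" pattern).insert "test_string" test_str).insert
    "expected_behavior" "catastrophic_backtracking"

theorem pvMkDict_get (pattern test_str : String) :
    ((pvMkDict pattern test_str).get? "test_string").getD "" = test_str := by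
  simp [pvMkDict, PySem.Dict.insert, PySem.Dict.empty, PySem.Dict.get?]

-- A's nested loop followed by the projection equals test_strings repeated once per pattern.
theorem pv_loop_eq (l : List String) (acc : List (PySem.Dict String String)) :
    (l.foldl (fun acc pattern =>
        pvTestStrings.foldl (fun acc2 test_str => acc2 ++ [pvMkDict pattern test_str]) acc) acc).map
      (fun p => (p.get? "test_string").getD "")
    = acc.map (fun p => (p.get? "test_string").getD "")
        ++ (List.replicate l.length pvTestStrings).flatten := by
  induction l generalizing acc with
  | nil => simp
  | cons pat rest ih =>
    simp only [List.foldl_cons, ih, List.length_cons, List.replicate_succ, List.flatten_cons]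
    simp [pvTestStrings, pvMkDict_get, List.append_assoc]

-- ===== VERDICT (by name: the statement is the Claim_ definition above) =====
theorem generate_regex_dos_spec : Claim_equal_generate_regex_dos := by
  intro patterns _
  unfold Spec_generate_regex_dos generate_regex_dos generate_regex_dos_alt
  cases patterns with
  | none => simpa using pv_loop_eq pvDefaultPatterns []
  | some l =>
    by_cases h : l.isEmpty <;> simp only [h, if_true] <;>
      simpa using pv_loop_eq _ []
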